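-- pv_equiv track=rewrite | github.com/rob634/rmhgeoapi | incremental_catalog_service.py | _is_geospatial_file
-- ===== SOURCE A (Python) =====
-- def _is_geospatial_file(file_path: str) -> bool:
--     """Check if file is a geospatial format"""
--     geospatial_extensions = {
--         '.tif', '.tiff', '.geotiff', '.jp2', '.j2k', '.img',
--         '.hdf', '.hdf5', '.h5', '.nc', '.grib', '.grib2', '.vrt',
--         '.geojson', '.json', '.shp', '.gpkg', '.kml', '.kmz', '.gml',
--         '.mbtiles', '.cog', '.zarr'
--     }
--
--     file_lower = file_path.lower()
--     return any(file_lower.endswith(ext) for ext in geospatial_extensions)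
-- ===== SOURCE B (Python) =====
-- GEO_SUFFIXES = frozenset({
--     'tif', 'tiff', 'geotiff', 'jp2', 'j2k', 'img',
--     'hdf', 'hdf5', 'h5', 'nc', 'grib', 'grib2', 'vrt',
--     'geojson', 'json', 'shp', 'gpkg', 'kml', 'kmz', 'gml',
--     'mbtiles', 'cog', 'zarr'
-- })
--
-- def _is_geospatial_file(file_path: str) -> bool:
--     """Check if file is a geospatial format: single backward scan that
--     extracts the part after the last dot and looks it up once."""
--     suffix = []
--     for ch in reversed(file_path.lower()):
--         if ch == '.':
--             return ''.join(reversed(suffix)) in GEO_SUFFIXES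
--         suffix.append(ch)
--     return False
-- ===== Notes on version B (the rewrite author's own statement) =====
-- stated objective: alternative
-- what changed: Replaces the any()-over-23-extensions endswith scan with a single backward scan that extracts the segment after the last dot and performs one set lookup.
import Mathlib
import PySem

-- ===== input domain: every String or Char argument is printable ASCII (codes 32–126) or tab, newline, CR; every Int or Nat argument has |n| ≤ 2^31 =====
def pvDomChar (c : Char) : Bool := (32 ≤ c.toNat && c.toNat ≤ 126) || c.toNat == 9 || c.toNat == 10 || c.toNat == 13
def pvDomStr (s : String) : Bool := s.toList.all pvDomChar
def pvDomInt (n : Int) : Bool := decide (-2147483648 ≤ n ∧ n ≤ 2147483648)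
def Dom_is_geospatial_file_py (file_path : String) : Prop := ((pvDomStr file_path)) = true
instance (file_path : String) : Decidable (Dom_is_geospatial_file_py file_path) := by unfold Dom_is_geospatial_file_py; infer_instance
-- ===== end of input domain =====

-- B replaces A's any()-over-23-extensions endswith scan with a single backward scan that
-- extracts the segment after the last dot and performs one set lookup (alternative, not claimed faster).


-- ===== PORT A =====
-- the Python set literal of extensions (all distinct; any() over it is iteration-order independent)
def geoExtensions : List String :=
  [".tif", ".tiff", ".geotiff", ".jp2", ".j2k", ".img",
   ".hdf", ".hdf5", ".h5", ".nc", ".grib", ".grib2", ".vrt",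
   ".geojson", ".json", ".shp", ".gpkg", ".kml", ".kmz", ".gml",
   ".mbtiles", ".cog", ".zarr"]

def is_geospatial_file_py (file_path : String) : Bool :=
  let file_lower := PySem.Str.lower file_path
  geoExtensions.any (fun ext => PySem.Str.endswith file_lower ext)

-- ===== PORT B =====
-- B's frozenset of extensions without the dot (all distinct)
def geoSuffixes : List String :=
  ["tif", "tiff", "geotiff", "jp2", "j2k", "img",
   "hdf", "hdf5", "h5", "nc", "grib", "grib2", "vrt",
   "geojson", "json", "shp", "gpkg", "kml", "kmz", "gml",
   "mbtiles", "cog", "zarr"]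

-- B's loop over reversed(low): accumulate chars until the first '.', then one membership test
def altGo : List Char → List Char → Bool
  | [], _ => false
  | c :: rest, acc =>
    if c = '.' then geoSuffixes.any (fun e => e.toList == acc.reverse)
    else altGo rest (acc ++ [c])

def is_geospatial_file_py_alt (file_path : String) : Bool :=
  altGo (PySem.Chars.lower file_path.toList).reverse []

-- ===== PRECONDITION & SPEC =====
def Spec_is_geospatial_file_py (file_path : String) (out : Bool) : Prop := out = is_geospatial_file_py_alt file_path
instance (file_path : String) (out : Bool) : Decidable (Spec_is_geospatial_file_py file_path out) := by unfold Spec_is_geospatial_file_py; infer_instance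

-- ===== CLAIM (what is proved, stated in full; the proofs are below) =====
def Claim_equal_is_geospatial_file_py : Prop := ∀ (file_path : String), Dom_is_geospatial_file_py file_path → Spec_is_geospatial_file_py file_path (is_geospatial_file_py file_path)

-- ===== LEMMAS AND PROOFS =====

-- A's extension table is exactly B's suffix table with a dot prepended
theorem geo_tables : geoExtensions.map String.toList = geoSuffixes.map (fun e => '.' :: e.toList) := by decide

-- no suffix in B's table contains a dot
theorem geo_nodot : ∀ e ∈ geoSuffixes, '.' ∉ e.toList := by decide

-- alignment at the last dot: a dot-free-tailed extension is a suffix of L ++ '.'::t (t dot-free)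
-- exactly when its tail equals t
theorem suffix_dot_block {e t : List Char} (L : List Char)
    (he : '.' ∉ e) (ht : '.' ∉ t) :
    ('.' :: e) <:+ (L ++ '.' :: t) ↔ e = t := by
  constructor
  · intro h
    have h2 : ('.' :: t) <:+ (L ++ '.' :: t) := List.suffix_append _ _
    rcases List.suffix_or_suffix_of_suffix h h2 with h' | h'
    · rcases List.suffix_cons_iff.mp h' with h'' | h''
      · injection h''
      · exact absurd (h''.subset List.mem_cons_self) ht
    · rcases List.suffix_cons_iff.mp h' with h'' | h''
      · injection h'' with _ h3; exact h3.symm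
      · exact absurd (h''.subset List.mem_cons_self) he
  · rintro rfl
    exact List.suffix_append _ _

-- loop invariant: with the dot-free accumulator acc (scan order), altGo computes A's any-endswith
-- on the already-reconstructed original string r.reverse ++ acc.reverse
theorem altGo_spec : ∀ (r acc : List Char), '.' ∉ acc →
    altGo r acc =
      geoExtensions.any (fun ext => PySem.Chars.endswith (r.reverse ++ acc.reverse) ext.toList) := by
  intro r
  induction r with
  | nil =>
    intro acc hacc
    simp only [altGo, List.reverse_nil, List.nil_append]
    symm
    rw [List.any_eq_false]
    intro ext hext hsuf
    rw [PySem.Chars.endswith_iff] at hsuf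
    have hx : ∃ e ∈ geoSuffixes, ext.toList = '.' :: e.toList := by
      have := congrArg (fun l => ext.toList ∈ l) geo_tables
      simp only [List.mem_map] at this
      rcases (this ▸ ⟨ext, hext, rfl⟩ : ∃ a ∈ geoSuffixes, '.' :: a.toList = ext.toList) with ⟨e, he, heq⟩
      exact ⟨e, he, heq.symm⟩
    rcases hx with ⟨e, _, heq⟩
    rw [heq] at hsuf
    exact hacc (List.mem_reverse.mp (hsuf.subset List.mem_cons_self))
  | cons c rest ih =>
    intro acc hacc
    by_cases hc : c = '.'
    · subst hc
      simp only [altGo, if_true]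
      have hL : ('.' :: rest).reverse ++ acc.reverse = rest.reverse ++ '.' :: acc.reverse := by
        simp
      rw [hL]
      have hmap : geoExtensions.any
            (fun ext => PySem.Chars.endswith (rest.reverse ++ '.' :: acc.reverse) ext.toList)
          = geoSuffixes.any
            (fun e => PySem.Chars.endswith (rest.reverse ++ '.' :: acc.reverse) ('.' :: e.toList)) := by
        have h1 : geoExtensions.any
              (fun ext => PySem.Chars.endswith (rest.reverse ++ '.' :: acc.reverse) ext.toList)
            = (geoExtensions.map String.toList).any
              (fun l => PySem.Chars.endswith (rest.reverse ++ '.' :: acc.reverse) l) := by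
          rw [List.any_map]; rfl
        rw [h1, geo_tables, List.any_map]; rfl
      rw [hmap]
      apply PySem.List.any_congr_mem
      intro e he
      rw [Bool.eq_iff_iff, beq_iff_eq, PySem.Chars.endswith_iff,
          suffix_dot_block rest.reverse (geo_nodot e he)
            (fun h => hacc (List.mem_reverse.mp h))]
    · simp only [altGo, if_neg hc]
      have hacc' : '.' ∉ acc ++ [c] := by
        intro h
        rcases List.mem_append.mp h with h | h
        · exact hacc h
        · exact hc (List.mem_singleton.mp h).symm
      rw [ih (acc ++ [c]) hacc']
      have : rest.reverse ++ (acc ++ [c]).reverse = (c :: rest).reverse ++ acc.reverse := by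
        simp
      rw [this]

-- ===== VERDICT (by name: the statement is the Claim_ definition above) =====
theorem is_geospatial_file_py_spec : Claim_equal_is_geospatial_file_py := by
  intro file_path _
  unfold Spec_is_geospatial_file_py is_geospatial_file_py is_geospatial_file_py_alt
  rw [altGo_spec _ [] (by simp)]
  simp only [List.reverse_nil, List.append_nil, List.reverse_reverse]
  apply PySem.List.any_congr_mem
  intro ext _
  simp [PySem.Str.endswith_eq, PySem.Str.toList_lower]
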